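-- pv_equiv track=rewrite | github.com/austral-prog/tp-7-valentinaotero-1 | loops_and_print.py | enumerate_backwards
-- ===== SOURCE A (Python) =====
-- def enumerate_backwards(list):
--     new_list = []
--     i = 0
--     for current_element in list:
--         if current_element != "":
--             atras = current_element[ : :-1]
--             nuevo_elemento = f"{i}. {atras}"
--             new_list.append(nuevo_elemento)
--             i += 1
--
--     return new_list
-- ===== SOURCE B (Python) =====
-- def enumerate_backwards(list):
--     total = sum(1 for s in list if s != "")
--     out = []
--     i = total
--     for s in reversed(list):
--         if s != "":
--             i -= 1
--             out.append(f"{i}. {s[::-1]}")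
--     out.reverse()
--     return out
-- ===== Notes on version B (the rewrite author's own statement) =====
-- stated objective: alternative
-- what changed: B first counts the non-empty strings, then traverses the list back-to-front with a descending counter, appending labels in reverse and reversing the result at the end, instead of A's single forward pass with an ascending counter.
import Mathlib
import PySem

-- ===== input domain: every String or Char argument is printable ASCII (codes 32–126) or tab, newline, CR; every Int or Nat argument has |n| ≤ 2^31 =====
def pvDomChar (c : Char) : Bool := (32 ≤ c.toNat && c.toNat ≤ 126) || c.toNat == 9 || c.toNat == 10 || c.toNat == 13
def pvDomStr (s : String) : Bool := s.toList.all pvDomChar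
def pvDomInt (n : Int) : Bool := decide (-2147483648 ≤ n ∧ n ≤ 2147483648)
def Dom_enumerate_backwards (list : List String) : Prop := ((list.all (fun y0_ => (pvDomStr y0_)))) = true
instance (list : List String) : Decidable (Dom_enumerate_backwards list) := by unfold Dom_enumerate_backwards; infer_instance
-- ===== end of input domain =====

-- B counts the non-empty strings first, then builds the labels back-to-front with a
-- descending counter and reverses at the end; objective: alternative (same cost).

-- ===== PORT A =====
-- renders the f-string f"{i}. {atras}"
def pvFmt (i : Int) (atras : String) : String := PySem.Int.toStr i ++ ". " ++ atras
-- s[::-1]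
def pvRev (s : String) : String := (PySem.Str.slice? s none none (-1)).getD ""

def enumerate_backwards (list : List String) : List String :=
  (list.foldl (fun (st : List String × Int) current_element =>
      if current_element ≠ "" then
        (st.1 ++ [pvFmt st.2 (pvRev current_element)], st.2 + 1)
      else st)
    ([], (0 : Int))).1

-- ===== PORT B =====
def enumerate_backwards_alt (list : List String) : List String :=
  let total : Int := list.foldl (fun n s => if s ≠ "" then n + 1 else n) 0
  ((list.reverse.foldl (fun (st : List String × Int) s =>
      if s ≠ "" then (st.1 ++ [pvFmt (st.2 - 1) (pvRev s)], st.2 - 1)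
      else st)
    ([], total)).1).reverse

-- ===== PRECONDITION & SPEC =====
def Spec_enumerate_backwards (list : List String) (out : List String) : Prop := out = enumerate_backwards_alt list
instance (list : List String) (out : List String) : Decidable (Spec_enumerate_backwards list out) := by unfold Spec_enumerate_backwards; infer_instance

-- ===== CLAIM (what is proved, stated in full; the proofs are below) =====
def Claim_equal_enumerate_backwards : Prop := ∀ (list : List String), Dom_enumerate_backwards list → Spec_enumerate_backwards list (enumerate_backwards list)

-- ===== LEMMAS AND PROOFS =====

-- the common normal form: numbered reversed non-empty strings starting at index i
def pvM (l : List String) (i : Int) : List String :=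
  (PySem.List.enumerate (l.filter (fun s => s ≠ "")) i).map (fun p => pvFmt p.1 (pvRev p.2))

theorem pv_loopA (l : List String) (acc : List String) (i : Int) :
    (l.foldl (fun (st : List String × Int) s =>
      if s ≠ "" then ((st.1 ++ [pvFmt st.2 (pvRev s)], st.2 + 1) : List String × Int)
      else st) (acc, i))
    = (acc ++ pvM l i, i + (l.filter (fun s => s ≠ "")).length) := by
  induction l generalizing acc i with
  | nil => simp [pvM, PySem.List.enumerate_nil]
  | cons s l ih =>
    rw [List.foldl_cons]
    by_cases hs : s = ""
    · rw [if_neg (by simp [hs]), ih]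
      simp [pvM, hs]
    · rw [if_pos (by simp [hs]), ih]
      simp [pvM, hs, PySem.List.enumerate_cons]
      omega

theorem pvM_append (xs : List String) (s : String) (hs : s ≠ "") (j : Int) :
    pvM (xs ++ [s]) j
      = pvM xs j ++ [pvFmt (j + (xs.filter (fun t => t ≠ "")).length) (pvRev s)] := by
  simp [pvM, List.filter_append, hs, PySem.List.enumerate_append]

theorem pv_loopB (l : List String) (acc : List String) (i : Int) :
    (l.foldl (fun (st : List String × Int) s =>
      if s ≠ "" then ((st.1 ++ [pvFmt (st.2 - 1) (pvRev s)], st.2 - 1) : List String × Int)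
      else st) (acc, i)).1
    = acc ++ (pvM l.reverse (i - (l.filter (fun s => s ≠ "")).length)).reverse := by
  induction l generalizing acc i with
  | nil => simp [pvM, PySem.List.enumerate_nil]
  | cons s l ih =>
    rw [List.foldl_cons]
    by_cases hs : s = ""
    · rw [if_neg (by simp [hs]), ih]
      simp [pvM, hs]
    · rw [if_pos (by simp [hs]), ih, List.reverse_cons, pvM_append _ _ hs]
      have hc : (List.filter (fun t => decide (t ≠ "")) (s :: l)).length
          = (List.filter (fun t => decide (t ≠ "")) l).length + 1 := by simp [hs]
      have hj : i - ((List.filter (fun t => decide (t ≠ "")) (s :: l)).length : Int)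
          = i - 1 - ((List.filter (fun t => decide (t ≠ "")) l).length : Int) := by
        rw [hc]; push_cast; ring
      simp only [List.filter_reverse, List.length_reverse, hj, List.reverse_append,
        List.reverse_cons, List.reverse_nil, List.nil_append, List.singleton_append,
        List.append_assoc, List.cons_append]
      have hi : i - 1 - ((List.filter (fun t => decide (t ≠ "")) l).length : Int)
          + ((List.filter (fun t => decide (t ≠ "")) l).length : Int) = i - 1 := by ring
      rw [hi]

theorem pv_count (l : List String) (n : Int) :
    l.foldl (fun n s => if s ≠ "" then n + 1 else n) n
      = n + (l.filter (fun s => s ≠ "")).length := by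
  induction l generalizing n with
  | nil => simp
  | cons s l ih =>
    rw [List.foldl_cons, ih]
    by_cases hs : s = "" <;> simp [hs] <;> omega

-- ===== VERDICT (by name: the statement is the Claim_ definition above) =====
theorem enumerate_backwards_spec : Claim_equal_enumerate_backwards := by
  intro l _
  unfold Spec_enumerate_backwards enumerate_backwards enumerate_backwards_alt
  simp only [pv_loopA, pv_loopB, pv_count, List.filter_reverse, List.length_reverse,
    List.reverse_reverse, List.nil_append]
  norm_num
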